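-- pv_equiv track=rewrite | github.com/bibajz/aoc-2020 | python/day11.py | evolve_point_pt2
-- ===== SOURCE A (Python) =====
-- from functools import partial
-- from itertools import product, count
-- from typing import List, Tuple, Callable
--
-- Grid = List[List[str]]
--
-- Adj_Indices = List[Tuple[int, int]]
--
-- def get_valid_adjacent_indices_pt2(grid: Grid, height: int, width: int) -> Adj_Indices:
--     max_height, max_width = len(grid), len(grid[0])
--
--     steps_north = zip(count(height - 1, step=-1), count(width, step=0))
--     steps_northeast = zip(count(height - 1, step=-1), count(width + 1, step=1))
--     steps_east = zip(count(height, step=0), count(width + 1, step=1))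
--     steps_southeast = zip(count(height + 1, step=1), count(width + 1, step=1))
--     steps_south = zip(count(height + 1, step=1), count(width, step=0))
--     steps_southwest = zip(count(height + 1, step=1), count(width - 1, step=-1))
--     steps_west = zip(count(height, step=0), count(width - 1, step=-1))
--     steps_northwest = zip(count(height - 1, step=-1), count(width - 1, step=-1))
--
--     directions = (
--         steps_north,
--         steps_northeast,
--         steps_east,
--         steps_southeast,
--         steps_south,
--         steps_southwest,
--         steps_west,
--         steps_northwest,
--     )
--     adjacent_valid = []
--     for dir_ in directions:
--         for h, w in dir_:
--             if h < 0 or h >= max_height: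
--                 break
--             if w < 0 or w >= max_width:
--                 break
--             if grid[h][w] in ("L", "#"):
--                 adjacent_valid.append((h, w))
--                 break
--
--     return adjacent_valid
--
-- def evolve_point_pt2(grid: Grid, i: int, j: int) -> str:
--     valid_adj_indices = partial(get_valid_adjacent_indices_pt2, grid)
--
--     if grid[i][j] == ".":
--         return "."
--     elif grid[i][j] == "L":
--         if all(grid[i_][j_] in (".", "L") for i_, j_ in valid_adj_indices(i, j)):
--             return "#"
--     else:
--         count_occ = 0
--         for i_, j_ in valid_adj_indices(i, j):
--             if grid[i_][j_] == "#":
--                 count_occ += 1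
--         if count_occ >= 5:
--             return "L"
--
--     # Nothing changes
--     return grid[i][j]
-- ===== SOURCE B (Python) =====
-- def evolve_point_pt2(grid, i, j):
--     cell = grid[i][j]
--     if cell == ".":
--         return "."
--     max_h, max_w = len(grid), len(grid[0])
--     span = max_h + max_w
--     occupied = 0
--     # One left-to-right pass over each of the four grid lines through (i, j):
--     # the nearest visible seat before the cell is the LAST seat seen at t < 0,
--     # the nearest one after it is the FIRST seat seen at t > 0.
--     for dh, dw in ((0, 1), (1, 0), (1, 1), (1, -1)):
--         before = None
--         after = None
--         for t in range(-span, span + 1):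
--             if t == 0:
--                 continue
--             h, w = i + t * dh, j + t * dw
--             if 0 <= h < max_h and 0 <= w < max_w:
--                 c = grid[h][w]
--                 if c == "L" or c == "#":
--                     if t < 0:
--                         before = c
--                     elif after is None:
--                         after = c
--         occupied += (before == "#") + (after == "#")
--     if cell == "L":
--         return "#" if occupied == 0 else cell
--     return "L" if occupied >= 5 else cell
-- ===== Notes on version B (the rewrite author's own statement) =====
-- stated objective: alternative
-- what changed: Instead of A's eight outward ray casts that each break at the first seat, B makes a single left-to-right pass over each of the four grid lines through the cell, keeping the last seat seen before the cell and the first seat seen after it as that line's two visible seats, and counts occupancy inline with no intermediate coordinate list.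
-- outside the precondition, e.g. on evolve_point_pt2([['#', '#', '#'], ['#', 'L', '#'], ['#', '#', '#']], -2, 1): A returns '#', B returns 'L'; on evolve_point_pt2([['x'], ['#', '#', 'L']], 1, 2): A returns '#', B returns 'L'; on evolve_point_pt2([['#', '#'], ['#', '#'], ['#']], 0, 1): A returns '#', B raises IndexError
import Mathlib
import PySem

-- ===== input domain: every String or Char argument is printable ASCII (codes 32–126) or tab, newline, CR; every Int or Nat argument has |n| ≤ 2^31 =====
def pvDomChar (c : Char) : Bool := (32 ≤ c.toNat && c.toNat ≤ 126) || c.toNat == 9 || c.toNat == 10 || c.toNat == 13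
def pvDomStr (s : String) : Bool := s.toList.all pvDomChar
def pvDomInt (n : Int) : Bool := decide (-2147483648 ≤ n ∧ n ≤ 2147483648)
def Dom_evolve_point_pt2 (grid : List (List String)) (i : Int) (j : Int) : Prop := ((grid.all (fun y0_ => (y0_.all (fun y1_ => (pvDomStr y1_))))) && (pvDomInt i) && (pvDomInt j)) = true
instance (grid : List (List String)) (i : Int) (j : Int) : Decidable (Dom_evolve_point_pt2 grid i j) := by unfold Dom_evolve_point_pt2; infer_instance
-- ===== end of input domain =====

-- B replaces A's eight outward ray casts (each breaking at the first seat) by one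
-- left-to-right pass over each of the four grid lines through the cell, keeping the
-- last seat seen before the cell and the first seat after it; objective: alternative.

-- ===== PORT A =====
-- grid[h][w] with Python index semantics; both ports only evaluate it where Python would
-- not raise (inside Pre_), so the "" default is never the value of a live cell there.
def pvCell (grid : List (List String)) (h w : Int) : String :=
  (PySem.List.pyGet? ((PySem.List.pyGet? grid h).getD []) w).getD ""

-- fuel bound for the ray walks: generous upper bound on the number of loop iterations
-- Python performs (each step moves h or w monotonically towards a bound)
def pvFuel (maxH maxW : Int) : Nat := (2 * (maxH + maxW)).toNat + 4

-- the inner 'for h, w in dir_: … break' loop of A: first visible seat along one direction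
def pvRayA (grid : List (List String)) (maxH maxW dh dw : Int) : Int → Int → Nat → Option (Int × Int)
  | _, _, 0 => none
  | h, w, fuel+1 =>
    if h < 0 ∨ h ≥ maxH then none
    else if w < 0 ∨ w ≥ maxW then none
    else if pvCell grid h w = "L" ∨ pvCell grid h w = "#" then some (h, w)
    else pvRayA grid maxH maxW dh dw (h + dh) (w + dw) fuel

def get_valid_adjacent_indices_pt2 (grid : List (List String)) (height width : Int) : List (Int × Int) :=
  let maxH : Int := grid.length
  let maxW : Int := (((PySem.List.pyGet? grid 0).getD []).length : Int)
  -- the eight zip(count, count) streams, in A's tuple order (N, NE, E, SE, S, SW, W, NW)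
  [((-1 : Int), (0 : Int)), (-1, 1), (0, 1), (1, 1), (1, 0), (1, -1), (0, -1), (-1, -1)].foldl
    (fun (acc : List (Int × Int)) (d : Int × Int) =>
      acc ++ (pvRayA grid maxH maxW d.1 d.2 (height + d.1) (width + d.2) (pvFuel maxH maxW)).toList)
    []

def evolve_point_pt2 (grid : List (List String)) (i : Int) (j : Int) : String :=
  if pvCell grid i j = "." then "."
  else if pvCell grid i j = "L" then
    if (get_valid_adjacent_indices_pt2 grid i j).all
        (fun p => pvCell grid p.1 p.2 == "." || pvCell grid p.1 p.2 == "L") then "#"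
    else pvCell grid i j
  else
    let count_occ : Int := (get_valid_adjacent_indices_pt2 grid i j).foldl
      (fun c p => if pvCell grid p.1 p.2 = "#" then c + 1 else c) 0
    if count_occ ≥ 5 then "L" else pvCell grid i j

-- ===== PORT B =====
-- the body of Source B's inner 'for t in range(-span, span + 1)' loop; state = (before, after)
def pvLineStep (grid : List (List String)) (maxH maxW i j dh dw : Int)
    (st : Option String × Option String) (t : Int) : Option String × Option String :=
  if t = 0 then st
  else
    let h := i + t * dh
    let w := j + t * dw
    if 0 ≤ h ∧ h < maxH ∧ 0 ≤ w ∧ w < maxW then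
      let c := pvCell grid h w
      if c = "L" ∨ c = "#" then
        if t < 0 then (some c, st.2)
        else if st.2 = none then (st.1, some c) else st
      else st
    else st

-- one left-to-right pass over the line {(i + t*dh, j + t*dw)}: last seat before / first after
def pvLine (grid : List (List String)) (maxH maxW i j dh dw span : Int) :
    Option String × Option String :=
  (PySem.List.pyRange (-span) (span + 1) 1).foldl (pvLineStep grid maxH maxW i j dh dw)
    (none, none)

-- Python's (x == "#") as an int summand
def pvOcc1 : Option String → Int
  | some c => if c = "#" then 1 else 0
  | none => 0

def evolve_point_pt2_alt (grid : List (List String)) (i : Int) (j : Int) : String :=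
  let cell := pvCell grid i j
  if cell = "." then "."
  else
    let maxH : Int := grid.length
    let maxW : Int := (((PySem.List.pyGet? grid 0).getD []).length : Int)
    let span : Int := maxH + maxW
    let occupied : Int :=
      [((0 : Int), (1 : Int)), (1, 0), (1, 1), (1, -1)].foldl
        (fun (acc : Int) (d : Int × Int) =>
          let p := pvLine grid maxH maxW i j d.1 d.2 span
          acc + pvOcc1 p.1 + pvOcc1 p.2) 0
    if cell = "L" then (if occupied = 0 then "#" else cell)
    else (if occupied ≥ 5 then "L" else cell)

-- ===== PRECONDITION & SPEC =====
-- Pre_ restricts to the task's natural domain — a non-empty grid whose rows are at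
-- least as long as row 0 (neither program ever reads past column len(grid[0])-1, so
-- this includes the ragged grids on which neither raises) with an in-range index
-- pair, allowing Python's idiomatic -1 alias; outside it A raises IndexError, except
-- where wraparound or ragged/empty rows let every lookup accidentally succeed: there
-- A's value is an artefact of its rays being cast from the raw out-of-range
-- coordinates (they break at the grid edge before reaching any seat the full-line
-- scan can see), and on ragged grids with a row shorter than row 0 whether either
-- program raises at all depends on which cells its scan happens to visit.
def Pre_evolve_point_pt2 (grid : List (List String)) (i : Int) (j : Int) : Prop :=
  grid ≠ [] ∧ (∀ row ∈ grid, grid.headI.length ≤ row.length) ∧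
  1 ≤ grid.headI.length ∧
  -1 ≤ i ∧ i < (grid.length : Int) ∧ -1 ≤ j ∧ j < (grid.headI.length : Int)
instance (grid : List (List String)) (i : Int) (j : Int) : Decidable (Pre_evolve_point_pt2 grid i j) := by unfold Pre_evolve_point_pt2; infer_instance

def pvWitness_evolve_point_pt2 : List (List String) × Int × Int :=
  ([["L", "#"], [".", "L"]], 0, 1)

def Spec_evolve_point_pt2 (grid : List (List String)) (i : Int) (j : Int) (out : String) : Prop := out = evolve_point_pt2_alt grid i j
instance (grid : List (List String)) (i : Int) (j : Int) (out : String) : Decidable (Spec_evolve_point_pt2 grid i j out) := by unfold Spec_evolve_point_pt2; infer_instance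

-- ===== CLAIM (what is proved, stated in full; the proofs are below) =====
def Claim_equal_evolve_point_pt2 : Prop := ∀ (grid : List (List String)) (i : Int) (j : Int), Dom_evolve_point_pt2 grid i j → Pre_evolve_point_pt2 grid i j → Spec_evolve_point_pt2 grid i j (evolve_point_pt2 grid i j)

-- ===== LEMMAS AND PROOFS =====

def pvOptHash (grid : List (List String)) : Option (Int × Int) → Int
  | none => 0
  | some p => if pvCell grid p.1 p.2 = "#" then 1 else 0

theorem pvRange_nil (a b : Int) (h : b ≤ a) : PySem.List.pyRange a b 1 = [] := by
  rw [PySem.List.pyRange_one]; simp [show (b - a).toNat = 0 by omega]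

theorem pvFold_skip (grid : List (List String)) (maxH maxW i j dh dw : Int) :
    ∀ (l : List Int) (st : Option String × Option String),
      (∀ t ∈ l, t = 0 ∨ ¬(0 ≤ i + t * dh ∧ i + t * dh < maxH ∧ 0 ≤ j + t * dw ∧ j + t * dw < maxW)) →
      l.foldl (pvLineStep grid maxH maxW i j dh dw) st = st := by
  intro l
  induction l with
  | nil => intro st _; rfl
  | cons t l ih =>
    intro st h
    have ht := h t (by simp)
    have hstep : pvLineStep grid maxH maxW i j dh dw st t = st := by
      rcases ht with rfl | hbad
      · simp [pvLineStep]
      · simp only [pvLineStep]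
        split_ifs <;> tauto
    rw [List.foldl_cons, hstep]
    exact ih st (fun t' ht' => h t' (by simp [ht']))

theorem pvFold_keep (grid : List (List String)) (maxH maxW i j dh dw : Int) :
    ∀ (l : List Int) (b : Option String) (c : String), (∀ t ∈ l, 0 < t) →
      l.foldl (pvLineStep grid maxH maxW i j dh dw) (b, some c) = (b, some c) := by
  intro l
  induction l with
  | nil => intro b c _; rfl
  | cons t l ih =>
    intro b c h
    have ht := h t (by simp)
    have hstep : pvLineStep grid maxH maxW i j dh dw (b, some c) t = (b, some c) := by
      simp only [pvLineStep]
      split_ifs <;> first | rfl | omega | simp_all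
    rw [List.foldl_cons, hstep]
    exact ih b c (fun t' ht' => h t' (by simp [ht']))

theorem pvFold_snd (grid : List (List String)) (maxH maxW i j dh dw : Int) :
    ∀ (l : List Int) (st : Option String × Option String), (∀ t ∈ l, t < 0) →
      (l.foldl (pvLineStep grid maxH maxW i j dh dw) st).2 = st.2 := by
  intro l
  induction l with
  | nil => intro st _; rfl
  | cons t l ih =>
    intro st h
    have ht := h t (by simp)
    rw [List.foldl_cons]
    rw [ih _ (fun t' ht' => h t' (by simp [ht']))]
    simp only [pvLineStep]
    split_ifs <;> simp

theorem pvGood_mono_pos (maxH maxW i j dh dw : Int)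
    (hdh : dh = -1 ∨ dh = 0 ∨ dh = 1) (hdw : dw = -1 ∨ dw = 0 ∨ dw = 1)
    (hi : -1 ≤ i) (hi2 : i < maxH) (hj : -1 ≤ j) (hj2 : j < maxW)
    (t t' : Int) (h1 : 1 ≤ t') (h2 : t' ≤ t)
    (hg : 0 ≤ i + t * dh ∧ i + t * dh < maxH ∧ 0 ≤ j + t * dw ∧ j + t * dw < maxW) :
    0 ≤ i + t' * dh ∧ i + t' * dh < maxH ∧ 0 ≤ j + t' * dw ∧ j + t' * dw < maxW := by
  rcases hdh with rfl | rfl | rfl <;> rcases hdw with rfl | rfl | rfl <;>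
    refine ⟨by omega, by omega, by omega, by omega⟩

theorem pvGood_mono_neg (maxH maxW i j dh dw : Int)
    (hdh : dh = -1 ∨ dh = 0 ∨ dh = 1) (hdw : dw = -1 ∨ dw = 0 ∨ dw = 1)
    (hi : -1 ≤ i) (hi2 : i < maxH) (hj : -1 ≤ j) (hj2 : j < maxW)
    (t t' : Int) (h1 : t ≤ t') (h2 : t' ≤ -1)
    (hg : 0 ≤ i + t * dh ∧ i + t * dh < maxH ∧ 0 ≤ j + t * dw ∧ j + t * dw < maxW) :
    0 ≤ i + t' * dh ∧ i + t' * dh < maxH ∧ 0 ≤ j + t' * dw ∧ j + t' * dw < maxW := by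
  rcases hdh with rfl | rfl | rfl <;> rcases hdw with rfl | rfl | rfl <;>
    refine ⟨by omega, by omega, by omega, by omega⟩

theorem pvGood_beyond (maxH maxW i j dh dw : Int)
    (hdh : dh = -1 ∨ dh = 0 ∨ dh = 1) (hdw : dw = -1 ∨ dw = 0 ∨ dw = 1)
    (hne : ¬(dh = 0 ∧ dw = 0)) (_hH : 1 ≤ maxH) (_hW : 1 ≤ maxW)
    (hi : -1 ≤ i) (hi2 : i < maxH) (hj : -1 ≤ j) (hj2 : j < maxW)
    (t : Int) (ht : maxH + maxW < t ∨ t < -(maxH + maxW)) :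
    ¬(0 ≤ i + t * dh ∧ i + t * dh < maxH ∧ 0 ≤ j + t * dw ∧ j + t * dw < maxW) := by
  rcases hdh with rfl | rfl | rfl <;> rcases hdw with rfl | rfl | rfl <;> first | (exact absurd ⟨rfl, rfl⟩ hne) | omega

theorem pvRayA_bad (grid : List (List String)) (maxH maxW dh dw h w : Int) (fuel : Nat)
    (hbad : ¬(0 ≤ h ∧ h < maxH ∧ 0 ≤ w ∧ w < maxW)) :
    pvRayA grid maxH maxW dh dw h w fuel = none := by
  cases fuel with
  | zero => simp [pvRayA]
  | succ f =>
    by_cases hA : h < 0 ∨ h ≥ maxH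
    · simp [pvRayA, hA]
    · have hB : w < 0 ∨ w ≥ maxW := by
        by_contra hc
        push Not at hA
        push Not at hc
        exact hbad ⟨by omega, by omega, by omega, by omega⟩
      simp [pvRayA, hA, hB]

theorem pvRayA_step (grid : List (List String)) (maxH maxW dh dw h w : Int) (f : Nat)
    (hg : 0 ≤ h ∧ h < maxH ∧ 0 ≤ w ∧ w < maxW) :
    pvRayA grid maxH maxW dh dw h w (f + 1) =
      if pvCell grid h w = "L" ∨ pvCell grid h w = "#" then some (h, w)
      else pvRayA grid maxH maxW dh dw (h + dh) (w + dw) f := by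
  simp only [pvRayA]
  rw [if_neg (by omega), if_neg (by omega)]

theorem pvPosFold (grid : List (List String)) (maxH maxW i j dh dw : Int)
    (hdh : dh = -1 ∨ dh = 0 ∨ dh = 1) (hdw : dw = -1 ∨ dw = 0 ∨ dw = 1)
    (hne : ¬(dh = 0 ∧ dw = 0)) (hH : 1 ≤ maxH) (hW : 1 ≤ maxW)
    (hi : -1 ≤ i) (hi2 : i < maxH) (hj : -1 ≤ j) (hj2 : j < maxW) :
    ∀ (fuel : Nat) (t0 : Int) (b : Option String), 1 ≤ t0 →
      (maxH + maxW + 1 - t0).toNat ≤ fuel →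
      (PySem.List.pyRange t0 (maxH + maxW + 1) 1).foldl
          (pvLineStep grid maxH maxW i j dh dw) (b, none)
        = (b, (pvRayA grid maxH maxW dh dw (i + t0 * dh) (j + t0 * dw) fuel).map
              (fun p => pvCell grid p.1 p.2)) := by
  intro fuel
  induction fuel with
  | zero =>
    intro t0 b h1 h2
    rw [pvRange_nil _ _ (by omega)]
    simp [pvRayA]
  | succ f ih =>
    intro t0 b h1 h2
    by_cases ht : maxH + maxW + 1 ≤ t0
    · rw [pvRange_nil _ _ ht]
      rw [pvRayA_bad grid maxH maxW dh dw _ _ _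
        (pvGood_beyond maxH maxW i j dh dw hdh hdw hne hH hW hi hi2 hj hj2 t0 (Or.inl (by omega)))]
      rfl
    · push Not at ht
      rw [PySem.List.pyRange_one_cons (by omega), List.foldl_cons]
      by_cases hg : 0 ≤ i + t0 * dh ∧ i + t0 * dh < maxH ∧ 0 ≤ j + t0 * dw ∧ j + t0 * dw < maxW
      · rw [pvRayA_step grid maxH maxW dh dw _ _ f hg]
        by_cases hs : pvCell grid (i + t0 * dh) (j + t0 * dw) = "L" ∨
            pvCell grid (i + t0 * dh) (j + t0 * dw) = "#"
        · have hstep : pvLineStep grid maxH maxW i j dh dw (b, none) t0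
              = (b, some (pvCell grid (i + t0 * dh) (j + t0 * dw))) := by
            simp only [pvLineStep]
            rw [if_neg (by omega), if_pos hg, if_pos hs, if_neg (by omega : ¬ t0 < 0)]
            simp
          rw [hstep, pvFold_keep grid maxH maxW i j dh dw _ _ _ (fun t' ht' => by
            have := (PySem.List.mem_pyRange_one.1 ht').1; omega)]
          rw [if_pos hs]
          simp
        · have hstep : pvLineStep grid maxH maxW i j dh dw (b, none) t0 = (b, none) := by
            simp only [pvLineStep]
            rw [if_neg (by omega), if_pos hg, if_neg hs]
          rw [hstep, if_neg hs]
          have harg1 : i + t0 * dh + dh = i + (t0 + 1) * dh := by ring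
          have harg2 : j + t0 * dw + dw = j + (t0 + 1) * dw := by ring
          rw [harg1, harg2]
          exact ih (t0 + 1) b (by omega) (by omega)
      · have hstep : pvLineStep grid maxH maxW i j dh dw (b, none) t0 = (b, none) := by
          simp only [pvLineStep]
          rw [if_neg (by omega), if_neg hg]
        rw [hstep, pvFold_skip grid maxH maxW i j dh dw _ _ (fun t' ht' => by
          right
          intro hgt
          exact hg (pvGood_mono_pos maxH maxW i j dh dw hdh hdw hi hi2 hj hj2 t' t0 h1
            (by have := (PySem.List.mem_pyRange_one.1 ht').1; omega) hgt))]
        rw [pvRayA_bad grid maxH maxW dh dw _ _ _ hg]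
        rfl

theorem pvNegFold (grid : List (List String)) (maxH maxW i j dh dw : Int)
    (hdh : dh = -1 ∨ dh = 0 ∨ dh = 1) (hdw : dw = -1 ∨ dw = 0 ∨ dw = 1)
    (hne : ¬(dh = 0 ∧ dw = 0)) (hH : 1 ≤ maxH) (hW : 1 ≤ maxW)
    (hi : -1 ≤ i) (hi2 : i < maxH) (hj : -1 ≤ j) (hj2 : j < maxW) :
    ∀ (fuel : Nat) (tE : Int), tE ≤ -1 →
      (tE + (maxH + maxW) + 1).toNat ≤ fuel →
      (PySem.List.pyRange (-(maxH + maxW)) (tE + 1) 1).foldl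
          (pvLineStep grid maxH maxW i j dh dw) (none, none)
        = ((pvRayA grid maxH maxW (-dh) (-dw) (i + tE * dh) (j + tE * dw) fuel).map
              (fun p => pvCell grid p.1 p.2), none) := by
  intro fuel
  induction fuel with
  | zero =>
    intro tE h1 h2
    rw [pvRange_nil _ _ (by omega)]
    simp [pvRayA]
  | succ f ih =>
    intro tE h1 h2
    by_cases ht : tE < -(maxH + maxW)
    · rw [pvRange_nil _ _ (by omega)]
      rw [pvRayA_bad grid maxH maxW (-dh) (-dw) _ _ _
        (pvGood_beyond maxH maxW i j dh dw hdh hdw hne hH hW hi hi2 hj hj2 tE (Or.inr ht))]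
      rfl
    · push Not at ht
      rw [PySem.List.pyRange_one_succ_right (by omega), List.foldl_append, List.foldl_cons,
        List.foldl_nil]
      by_cases hg : 0 ≤ i + tE * dh ∧ i + tE * dh < maxH ∧ 0 ≤ j + tE * dw ∧ j + tE * dw < maxW
      · rw [pvRayA_step grid maxH maxW (-dh) (-dw) _ _ f hg]
        by_cases hs : pvCell grid (i + tE * dh) (j + tE * dw) = "L" ∨
            pvCell grid (i + tE * dh) (j + tE * dw) = "#"
        · rw [if_pos hs]
          have hsnd := pvFold_snd grid maxH maxW i j dh dw
            (PySem.List.pyRange (-(maxH + maxW)) tE 1) (none, none)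
            (fun t' ht' => by have := (PySem.List.mem_pyRange_one.1 ht').2; omega)
          simp only [pvLineStep]
          rw [if_neg (by omega), if_pos hg, if_pos hs, if_pos (by omega : tE < 0)]
          rw [hsnd]
          simp
        · rw [if_neg hs]
          have hstep : ∀ st, pvLineStep grid maxH maxW i j dh dw st tE = st := by
            intro st
            simp only [pvLineStep]
            rw [if_neg (by omega), if_pos hg, if_neg hs]
          rw [hstep]
          have harg1 : i + tE * dh + -dh = i + (tE - 1) * dh := by ring
          have harg2 : j + tE * dw + -dw = j + (tE - 1) * dw := by ring
          rw [harg1, harg2]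
          have := ih (tE - 1) (by omega) (by omega)
          rw [show tE - 1 + 1 = tE by omega] at this
          exact this
      · have hstep : ∀ st, pvLineStep grid maxH maxW i j dh dw st tE = st := by
          intro st
          simp only [pvLineStep]
          rw [if_neg (by omega), if_neg hg]
        rw [hstep, pvFold_skip grid maxH maxW i j dh dw _ _ (fun t' ht' => by
          right
          intro hgt
          exact hg (pvGood_mono_neg maxH maxW i j dh dw hdh hdw hi hi2 hj hj2 t' tE
            (by have := (PySem.List.mem_pyRange_one.1 ht').2; omega) h1 hgt))]
        rw [pvRayA_bad grid maxH maxW (-dh) (-dw) _ _ _ hg]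
        rfl

theorem pvLine_eq (grid : List (List String)) (maxH maxW i j dh dw : Int)
    (hdh : dh = -1 ∨ dh = 0 ∨ dh = 1) (hdw : dw = -1 ∨ dw = 0 ∨ dw = 1)
    (hne : ¬(dh = 0 ∧ dw = 0)) (hH : 1 ≤ maxH) (hW : 1 ≤ maxW)
    (hi : -1 ≤ i) (hi2 : i < maxH) (hj : -1 ≤ j) (hj2 : j < maxW) :
    pvLine grid maxH maxW i j dh dw (maxH + maxW)
      = ((pvRayA grid maxH maxW (-dh) (-dw) (i + -1 * dh) (j + -1 * dw) (pvFuel maxH maxW)).map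
            (fun p => pvCell grid p.1 p.2),
         (pvRayA grid maxH maxW dh dw (i + 1 * dh) (j + 1 * dw) (pvFuel maxH maxW)).map
            (fun p => pvCell grid p.1 p.2)) := by
  unfold pvLine
  rw [PySem.List.pyRange_one_append (-(maxH + maxW)) 0 (maxH + maxW + 1) (by omega) (by omega),
    List.foldl_append]
  have hneg := pvNegFold grid maxH maxW i j dh dw hdh hdw hne hH hW hi hi2 hj hj2
    (pvFuel maxH maxW) (-1) (by omega) (by unfold pvFuel; omega)
  rw [show (-1 : Int) + 1 = 0 by omega] at hneg
  rw [hneg]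
  rw [PySem.List.pyRange_one_cons (by omega : (0 : Int) < maxH + maxW + 1), List.foldl_cons]
  rw [show pvLineStep grid maxH maxW i j dh dw
      ((pvRayA grid maxH maxW (-dh) (-dw) (i + -1 * dh) (j + -1 * dw) (pvFuel maxH maxW)).map
        (fun p => pvCell grid p.1 p.2), none) 0
      = ((pvRayA grid maxH maxW (-dh) (-dw) (i + -1 * dh) (j + -1 * dw) (pvFuel maxH maxW)).map
        (fun p => pvCell grid p.1 p.2), none) from by simp [pvLineStep]]
  exact pvPosFold grid maxH maxW i j dh dw hdh hdw hne hH hW hi hi2 hj hj2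
    (pvFuel maxH maxW) 1 _ (by omega) (by unfold pvFuel; omega)

theorem pvOcc1_map (grid : List (List String)) (o : Option (Int × Int)) :
    pvOcc1 (o.map (fun p => pvCell grid p.1 p.2)) = pvOptHash grid o := by
  cases o <;> simp [pvOcc1, pvOptHash]

theorem pvRayA_seat (grid : List (List String)) (mh mw dh dw : Int) :
    ∀ (fuel : Nat) (h w : Int) (p : Int × Int),
      pvRayA grid mh mw dh dw h w fuel = some p →
      pvCell grid p.1 p.2 = "L" ∨ pvCell grid p.1 p.2 = "#" := by
  intro fuel
  induction fuel with
  | zero => intro h w p hp; simp [pvRayA] at hp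
  | succ n ih =>
    intro h w p hp
    simp only [pvRayA] at hp
    split_ifs at hp with h1 h2 h3
    all_goals first
      | exact ih _ _ _ hp
      | (obtain rfl : (h, w) = p := Option.some.inj hp; exact h3)

theorem countP_flatMap_eq_sum (grid : List (List String)) (f : (Int × Int) → Option (Int × Int)) :
    ∀ (ds : List (Int × Int)),
      (((ds.flatMap (fun d => (f d).toList)).countP
          (fun p => pvCell grid p.1 p.2 = "#")) : Int)
        = (ds.map (fun d => pvOptHash grid (f d))).sum := by
  intro ds
  induction ds with
  | nil => simp
  | cons d ds ih =>
    simp only [List.flatMap_cons, List.countP_append, List.map_cons, List.sum_cons]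
    rw [Nat.cast_add, ih]
    have : ((((f d).toList.countP (fun p => pvCell grid p.1 p.2 = "#")) : Int))
        = pvOptHash grid (f d) := by
      cases hf : f d with
      | none => simp [pvOptHash]
      | some p =>
        by_cases hp : pvCell grid p.1 p.2 = "#" <;>
          simp [pvOptHash, hp]
    omega

theorem seat_of_mem_flatMap (grid : List (List String)) (mh mw : Int) (fuel : Nat)
    (i j : Int) (ds : List (Int × Int)) (p : Int × Int)
    (hp : p ∈ ds.flatMap
      (fun d => (pvRayA grid mh mw d.1 d.2 (i + d.1) (j + d.2) fuel).toList)) :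
    pvCell grid p.1 p.2 = "L" ∨ pvCell grid p.1 p.2 = "#" := by
  rcases List.mem_flatMap.1 hp with ⟨d, _, hpd⟩
  cases hfd : pvRayA grid mh mw d.1 d.2 (i + d.1) (j + d.2) fuel with
  | none => rw [hfd] at hpd; simp at hpd
  | some q =>
    rw [hfd] at hpd; simp at hpd; subst hpd
    exact pvRayA_seat grid mh mw d.1 d.2 fuel _ _ _ hfd

theorem pvOcc_eq (grid : List (List String)) (maxH maxW i j : Int)
    (hH : 1 ≤ maxH) (hW : 1 ≤ maxW)
    (hi : -1 ≤ i) (hi2 : i < maxH) (hj : -1 ≤ j) (hj2 : j < maxW) :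
    ([((0 : Int), (1 : Int)), (1, 0), (1, 1), (1, -1)].foldl
        (fun (acc : Int) (d : Int × Int) =>
          let p := pvLine grid maxH maxW i j d.1 d.2 (maxH + maxW)
          acc + pvOcc1 p.1 + pvOcc1 p.2) 0)
      = ([((-1 : Int), (0 : Int)), (-1, 1), (0, 1), (1, 1), (1, 0), (1, -1), (0, -1), (-1, -1)].foldl
          (fun (acc : List (Int × Int)) (d : Int × Int) =>
            acc ++ (pvRayA grid maxH maxW d.1 d.2 (i + d.1) (j + d.2) (pvFuel maxH maxW)).toList)
          []).foldl (fun (c : Int) p => if pvCell grid p.1 p.2 = "#" then c + 1 else c) 0 := by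
  rw [PySem.List.foldl_append_eq_flatMap, List.nil_append, PySem.List.foldl_ite_add_one]
  rw [countP_flatMap_eq_sum grid
    (fun d => pvRayA grid maxH maxW d.1 d.2 (i + d.1) (j + d.2) (pvFuel maxH maxW))]
  simp only [List.foldl_cons, List.foldl_nil, List.map_cons, List.map_nil, List.sum_cons,
    List.sum_nil]
  rw [pvLine_eq grid maxH maxW i j 0 1 (by norm_num) (by norm_num) (by norm_num) hH hW hi hi2 hj hj2,
    pvLine_eq grid maxH maxW i j 1 0 (by norm_num) (by norm_num) (by norm_num) hH hW hi hi2 hj hj2,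
    pvLine_eq grid maxH maxW i j 1 1 (by norm_num) (by norm_num) (by norm_num) hH hW hi hi2 hj hj2,
    pvLine_eq grid maxH maxW i j 1 (-1) (by norm_num) (by norm_num) (by norm_num) hH hW hi hi2 hj hj2]
  simp only [pvOcc1_map]
  norm_num
  ring_nf

theorem pvAll_iff (grid : List (List String)) (maxH maxW i j : Int) :
    ((([((-1 : Int), (0 : Int)), (-1, 1), (0, 1), (1, 1), (1, 0), (1, -1), (0, -1), (-1, -1)].foldl
          (fun (acc : List (Int × Int)) (d : Int × Int) =>
            acc ++ (pvRayA grid maxH maxW d.1 d.2 (i + d.1) (j + d.2) (pvFuel maxH maxW)).toList)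
          []).all
        (fun p => pvCell grid p.1 p.2 == "." || pvCell grid p.1 p.2 == "L")) = true)
      ↔ ([((-1 : Int), (0 : Int)), (-1, 1), (0, 1), (1, 1), (1, 0), (1, -1), (0, -1), (-1, -1)].foldl
          (fun (acc : List (Int × Int)) (d : Int × Int) =>
            acc ++ (pvRayA grid maxH maxW d.1 d.2 (i + d.1) (j + d.2) (pvFuel maxH maxW)).toList)
          []).foldl (fun (c : Int) p => if pvCell grid p.1 p.2 = "#" then c + 1 else c) 0 = 0 := by
  rw [PySem.List.foldl_append_eq_flatMap, List.nil_append, PySem.List.foldl_ite_add_one,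
    List.all_eq_true]
  constructor
  · intro h
    have hz : (([((-1 : Int), (0 : Int)), (-1, 1), (0, 1), (1, 1), (1, 0), (1, -1), (0, -1), (-1, -1)].flatMap
        (fun d => (pvRayA grid maxH maxW d.1 d.2 (i + d.1) (j + d.2) (pvFuel maxH maxW)).toList)).countP
          (fun p => pvCell grid p.1 p.2 = "#")) = 0 := by
      rw [List.countP_eq_zero]
      intro p hp
      rcases seat_of_mem_flatMap grid maxH maxW (pvFuel maxH maxW) i j _ p hp with hs | hs
      · simp [hs]
      · have := h p hp
        simp [hs] at this
    omega
  · intro h p hp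
    have hz : (([((-1 : Int), (0 : Int)), (-1, 1), (0, 1), (1, 1), (1, 0), (1, -1), (0, -1), (-1, -1)].flatMap
        (fun d => (pvRayA grid maxH maxW d.1 d.2 (i + d.1) (j + d.2) (pvFuel maxH maxW)).toList)).countP
          (fun p => pvCell grid p.1 p.2 = "#")) = 0 := by omega
    rw [List.countP_eq_zero] at hz
    have := hz p hp
    rcases seat_of_mem_flatMap grid maxH maxW (pvFuel maxH maxW) i j _ p hp with hs | hs
    · simp [hs]
    · simp [hs] at this

theorem evolve_core (grid : List (List String)) (i j : Int)
    (h1 : grid ≠ []) (h3 : 1 ≤ grid.headI.length)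
    (h4 : -1 ≤ i) (h5 : i < (grid.length : Int))
    (h6 : -1 ≤ j) (h7 : j < (grid.headI.length : Int)) :
    evolve_point_pt2 grid i j = evolve_point_pt2_alt grid i j := by
  have hg0 : (PySem.List.pyGet? grid 0).getD [] = grid.headI := by
    cases grid with
    | nil => exact absurd rfl h1
    | cons r l => simp [PySem.List.pyGet?, PySem.List.pyIdx?]
  have hH : 1 ≤ (grid.length : Int) := by
    cases grid with
    | nil => exact absurd rfl h1
    | cons r l => simp
  have hW : 1 ≤ (((PySem.List.pyGet? grid 0).getD []).length : Int) := by
    rw [hg0]; exact_mod_cast h3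
  have hj7 : j < (((PySem.List.pyGet? grid 0).getD []).length : Int) := by
    rw [hg0]; exact h7
  simp only [evolve_point_pt2, evolve_point_pt2_alt, get_valid_adjacent_indices_pt2]
  by_cases hdot : pvCell grid i j = "."
  · simp [hdot]
  · by_cases hL : pvCell grid i j = "L"
    · simp only [if_neg hdot, if_pos hL]
      refine if_congr ?_ rfl rfl
      rw [pvAll_iff grid _ _ i j]
      constructor
      · intro h
        rw [← pvOcc_eq grid _ _ i j hH hW h4 h5 h6 hj7] at h
        exact h
      · intro h
        rw [← pvOcc_eq grid _ _ i j hH hW h4 h5 h6 hj7]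
        exact h
    · simp only [if_neg hdot, if_neg hL]
      exact if_congr (by rw [pvOcc_eq grid _ _ i j hH hW h4 h5 h6 hj7]) rfl rfl

-- ===== VERDICT (by name: the statement is the Claim_ definition above) =====
theorem evolve_point_pt2_spec : Claim_equal_evolve_point_pt2 := by
  intro grid i j _ hpre
  obtain ⟨h1, _h2, h3, h4, h5, h6, h7⟩ := hpre
  unfold Spec_evolve_point_pt2
  exact evolve_core grid i j h1 h3 h4 h5 h6 h7
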